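-- pv_equiv track=rewrite | github.com/yyuan29/python_llm | test_projects/project001/markdown_compiler/util/line_functions.py | compile_headers
-- ===== SOURCE A (Python) =====
-- def compile_headers(line):
--     '''
--     Convert markdown headers into <h1>,<h2>,etc tags.
--
--     HINT:
--     This is the simplest function to implement in this assignment.
--     Use a slices to extract the first part of the line,
--     then use if statements to check if they match the
--     appropriate header markdown commands.
--
--     >>> compile_headers('# This is the main header')
--     '<h1> This is the main header</h1>'
--     >>> compile_headers('## This is a sub-header')
--     '<h2> This is a sub-header</h2>'
--     >>> compile_headers('### This is a sub-header')
--     '<h3> This is a sub-header</h3>'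
--     >>> compile_headers('#### This is a sub-header')
--     '<h4> This is a sub-header</h4>'
--     >>> compile_headers('##### This is a sub-header')
--     '<h5> This is a sub-header</h5>'
--     >>> compile_headers('###### This is a sub-header')
--     '<h6> This is a sub-header</h6>'
--     >>> compile_headers('      # this is not a header')
--     '      # this is not a header'
--     '''
--     result = ""
--     for i in range(6, 0, -1):
--         prefix = '#' * i + " "
--         if line[:i + 1] == prefix:
--             result = "<h" + f"{i}" + "> " + line[i + 1:] + "</h" + f"{i}" + ">"
--     if result == "":
--         return line
--     return result
-- ===== SOURCE B (Python) =====
-- def compile_headers(line):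
--     level = 0
--     while level < len(line) and line[level] == '#':
--         level += 1
--     if 1 <= level <= 6 and line[level:level + 1] == ' ':
--         return f"<h{level}> {line[level + 1:]}</h{level}>"
--     return line
-- ===== Notes on version B (the rewrite author's own statement) =====
-- stated objective: simpler
-- what changed: B counts the leading hash characters once and tests that single level directly, instead of A's loop over the six candidate prefix strings with slice comparisons and a sentinel result.
import Mathlib
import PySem

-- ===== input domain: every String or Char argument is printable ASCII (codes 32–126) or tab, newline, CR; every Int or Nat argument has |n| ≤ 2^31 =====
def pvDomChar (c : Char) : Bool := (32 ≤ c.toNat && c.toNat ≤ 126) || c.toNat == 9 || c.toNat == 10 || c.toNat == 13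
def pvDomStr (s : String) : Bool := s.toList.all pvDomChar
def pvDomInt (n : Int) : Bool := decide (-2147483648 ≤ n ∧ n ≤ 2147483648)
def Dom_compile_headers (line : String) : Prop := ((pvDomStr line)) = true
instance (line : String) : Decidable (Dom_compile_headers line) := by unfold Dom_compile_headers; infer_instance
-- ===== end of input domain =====

-- B counts the leading hash characters once and tests that single level, instead of A's
-- loop over the six candidate prefix strings; same return value on every string.

-- ===== PORT A =====
-- literal transliteration of A: result accumulator, for i in range(6,0,-1), the i-hashes-plus-space prefix,
-- slice comparison line[:i+1] == prefix, then the empty-result check.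
def compile_headers (line : String) : String :=
  let l := line.toList
  let result : List Char :=
    (PySem.List.pyRange 6 0 (-1)).foldl (fun result i =>
      let pre := PySem.List.pyRepeat ['#'] i ++ [' ']
      if PySem.List.slice l none (some (i + 1)) = pre then
        "<h".toList ++ PySem.Int.toChars i ++ "> ".toList ++
          PySem.List.slice l (some (i + 1)) none ++
          "</h".toList ++ PySem.Int.toChars i ++ ">".toList
      else result) []
  if result = [] then line else String.ofList result

-- ===== PORT B =====
-- B's while loop counting leading hash characters
def hashLevel : List Char → Nat
  | [] => 0
  | c :: rest => if c = '#' then hashLevel rest + 1 else 0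

def compile_headers_alt (line : String) : String :=
  let l := line.toList
  let level := hashLevel l
  if 1 ≤ level ∧ level ≤ 6 ∧
      PySem.List.slice l (some (level : Int)) (some ((level : Int) + 1)) = [' '] then
    String.ofList ("<h".toList ++ PySem.Int.toChars (level : Int) ++ "> ".toList ++
      l.drop (level + 1) ++ "</h".toList ++ PySem.Int.toChars (level : Int) ++ ">".toList)
  else line

-- ===== PRECONDITION & SPEC =====
def Spec_compile_headers (line : String) (out : String) : Prop := out = compile_headers_alt line
instance (line : String) (out : String) : Decidable (Spec_compile_headers line out) := by unfold Spec_compile_headers; infer_instance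

-- ===== CLAIM (what is proved, stated in full; the proofs are below) =====
def Claim_equal_compile_headers : Prop := ∀ (line : String), Dom_compile_headers line → Spec_compile_headers line (compile_headers line)

-- ===== LEMMAS AND PROOFS =====

-- A's prefix test at level i holds iff the leading-'#' count is exactly i and a space follows
theorem take_eq_header_iff (l : List Char) (i : Nat) :
    (l.take (i + 1) = List.replicate i '#' ++ [' ']) ↔
      (hashLevel l = i ∧ (l.drop i).take 1 = [' ']) := by
  induction i generalizing l with
  | zero =>
    cases l with
    | nil => simp [hashLevel]
    | cons c t =>
      simp only [List.replicate_zero, List.nil_append, List.take_succ_cons, List.take_zero,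
        List.drop_zero, hashLevel]
      constructor
      · intro h
        obtain ⟨rfl, -⟩ := List.cons.inj h
        exact ⟨by rw [if_neg (by decide : ¬(' ' = '#'))], h⟩
      · exact fun h => h.2
  | succ i ih =>
    cases l with
    | nil => simp [hashLevel]
    | cons c t =>
      rw [List.take_succ_cons, List.replicate_succ, List.cons_append, List.drop_succ_cons]
      simp only [hashLevel]
      by_cases hc : c = '#'
      · subst hc
        simp only [List.cons.injEq, true_and, if_true]
        rw [ih t]
        constructor
        · rintro ⟨h3, h4⟩; exact ⟨by omega, h4⟩
        · rintro ⟨h3, h4⟩; exact ⟨by omega, h4⟩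
      · constructor
        · intro h; exact absurd (List.cons.inj h).1 hc
        · rintro ⟨h0, -⟩; rw [if_neg hc] at h0; omega

-- A's slice condition at level i, rephrased through take_eq_header_iff
theorem condA_iff (l : List Char) (i : Nat) :
    (PySem.List.slice l none (some ((i : Int) + 1)) = PySem.List.pyRepeat ['#'] (i : Int) ++ [' ']) ↔
      (hashLevel l = i ∧ (l.drop i).take 1 = [' ']) := by
  rw [show ((i : Int) + 1) = (((i + 1 : Nat)) : Int) by push_cast; ring]
  rw [PySem.List.slice_to_natCast, PySem.List.pyRepeat_singleton]
  simp only [Int.toNat_natCast]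
  exact take_eq_header_iff l i

-- B's one-character slice is drop-then-take
theorem condB_eq (l : List Char) (k : Nat) :
    PySem.List.slice l (some (k : Int)) (some ((k : Int) + 1)) = (l.drop k).take 1 := by
  have h := PySem.List.slice_natCast_add (xs := l) (j := k) (n := 1)
  simpa using h

-- A's tail slice is drop
theorem tail_eq (l : List Char) (i : Nat) :
    PySem.List.slice l (some ((i : Int) + 1)) none = l.drop (i + 1) := by
  rw [show ((i : Int) + 1) = (((i + 1 : Nat)) : Int) by push_cast; ring]
  exact PySem.List.slice_from_natCast l (i + 1)

-- ===== VERDICT (by name: the statement is the Claim_ definition above) =====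
theorem compile_headers_spec : Claim_equal_compile_headers := by
  intro line _
  unfold Spec_compile_headers compile_headers compile_headers_alt
  have hr : PySem.List.pyRange 6 0 (-1) =
      [((6 : Nat) : Int), ((5 : Nat) : Int), ((4 : Nat) : Int),
       ((3 : Nat) : Int), ((2 : Nat) : Int), ((1 : Nat) : Int)] := by decide
  rw [hr]
  simp only [List.foldl]
  set l := line.toList with hl
  rw [condB_eq l (hashLevel l)]
  simp only [condA_iff l 6, condA_iff l 5, condA_iff l 4, condA_iff l 3,
    condA_iff l 2, condA_iff l 1]
  have hne : ∀ (i : Nat) (xs : List Char),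
      "<h".toList ++ PySem.Int.toChars (i : Int) ++ "> ".toList ++ xs ++
        "</h".toList ++ PySem.Int.toChars (i : Int) ++ ">".toList ≠ [] := by
    intro i xs h
    have h2 : "<h".toList = ['<', 'h'] := rfl
    rw [h2] at h
    simp at h
  by_cases hsp : List.take 1 (List.drop (hashLevel l) l) = [' ']
  · by_cases h1 : hashLevel l = 1
    · have p1 : hashLevel l = 1 ∧ List.take 1 (List.drop 1 l) = [' '] :=
          ⟨h1, h1 ▸ hsp⟩
      rw [if_pos p1, if_neg (hne 1 _), tail_eq l 1, h1]
      have pB : (1 : Nat) ≤ 1 ∧ (1 : Nat) ≤ 6 ∧ List.take 1 (List.drop 1 l) = [' '] :=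
        ⟨by norm_num, by norm_num, h1 ▸ hsp⟩
      rw [if_pos pB]
    · have n1 : ¬(hashLevel l = 1 ∧ List.take 1 (List.drop 1 l) = [' ']) :=
          fun h => by have := h.1; omega
      rw [if_neg n1]
      by_cases h2 : hashLevel l = 2
      · have p2 : hashLevel l = 2 ∧ List.take 1 (List.drop 2 l) = [' '] :=
            ⟨h2, h2 ▸ hsp⟩
        rw [if_pos p2, if_neg (hne 2 _), tail_eq l 2, h2]
        have pB : (1 : Nat) ≤ 2 ∧ (2 : Nat) ≤ 6 ∧ List.take 1 (List.drop 2 l) = [' '] :=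
          ⟨by norm_num, by norm_num, h2 ▸ hsp⟩
        rw [if_pos pB]
      · have n2 : ¬(hashLevel l = 2 ∧ List.take 1 (List.drop 2 l) = [' ']) :=
            fun h => by have := h.1; omega
        rw [if_neg n2]
        by_cases h3 : hashLevel l = 3
        · have p3 : hashLevel l = 3 ∧ List.take 1 (List.drop 3 l) = [' '] :=
              ⟨h3, h3 ▸ hsp⟩
          rw [if_pos p3, if_neg (hne 3 _), tail_eq l 3, h3]
          have pB : (1 : Nat) ≤ 3 ∧ (3 : Nat) ≤ 6 ∧ List.take 1 (List.drop 3 l) = [' '] :=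
            ⟨by norm_num, by norm_num, h3 ▸ hsp⟩
          rw [if_pos pB]
        · have n3 : ¬(hashLevel l = 3 ∧ List.take 1 (List.drop 3 l) = [' ']) :=
              fun h => by have := h.1; omega
          rw [if_neg n3]
          by_cases h4 : hashLevel l = 4
          · have p4 : hashLevel l = 4 ∧ List.take 1 (List.drop 4 l) = [' '] :=
                ⟨h4, h4 ▸ hsp⟩
            rw [if_pos p4, if_neg (hne 4 _), tail_eq l 4, h4]
            have pB : (1 : Nat) ≤ 4 ∧ (4 : Nat) ≤ 6 ∧ List.take 1 (List.drop 4 l) = [' '] :=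
              ⟨by norm_num, by norm_num, h4 ▸ hsp⟩
            rw [if_pos pB]
          · have n4 : ¬(hashLevel l = 4 ∧ List.take 1 (List.drop 4 l) = [' ']) :=
                fun h => by have := h.1; omega
            rw [if_neg n4]
            by_cases h5 : hashLevel l = 5
            · have p5 : hashLevel l = 5 ∧ List.take 1 (List.drop 5 l) = [' '] :=
                  ⟨h5, h5 ▸ hsp⟩
              rw [if_pos p5, if_neg (hne 5 _), tail_eq l 5, h5]
              have pB : (1 : Nat) ≤ 5 ∧ (5 : Nat) ≤ 6 ∧ List.take 1 (List.drop 5 l) = [' '] :=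
                ⟨by norm_num, by norm_num, h5 ▸ hsp⟩
              rw [if_pos pB]
            · have n5 : ¬(hashLevel l = 5 ∧ List.take 1 (List.drop 5 l) = [' ']) :=
                  fun h => by have := h.1; omega
              rw [if_neg n5]
              by_cases h6 : hashLevel l = 6
              · have p6 : hashLevel l = 6 ∧ List.take 1 (List.drop 6 l) = [' '] :=
                    ⟨h6, h6 ▸ hsp⟩
                rw [if_pos p6, if_neg (hne 6 _), tail_eq l 6, h6]
                have pB : (1 : Nat) ≤ 6 ∧ (6 : Nat) ≤ 6 ∧ List.take 1 (List.drop 6 l) = [' '] :=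
                  ⟨by norm_num, by norm_num, h6 ▸ hsp⟩
                rw [if_pos pB]
              · have n6 : ¬(hashLevel l = 6 ∧ List.take 1 (List.drop 6 l) = [' ']) :=
                    fun h => by have := h.1; omega
                rw [if_neg n6]
                rw [if_pos (rfl : ([] : List Char) = [])]
                have nB : ¬((1 : Nat) ≤ hashLevel l ∧ hashLevel l ≤ 6 ∧ List.take 1 (List.drop (hashLevel l) l) = [' ']) :=
                  fun h => by have ha := h.1; have hb := h.2.1; omega
                rw [if_neg nB]
  · have nsp : ∀ i : Nat, ¬(hashLevel l = i ∧ List.take 1 (List.drop i l) = [' ']) :=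
      fun i h => hsp (by rw [h.1]; exact h.2)
    rw [if_neg (nsp 1), if_neg (nsp 2), if_neg (nsp 3), if_neg (nsp 4),
      if_neg (nsp 5), if_neg (nsp 6), if_pos (rfl : ([] : List Char) = []),
      if_neg (fun h => hsp h.2.2)]
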